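-- pv_equiv track=rewrite | github.com/ianuvrat/stock_mda_repo | src/main.py | first_sequence
-- ===== SOURCE A (Python) =====
-- def first_sequence(lst):
--     result = []
--     for i in range(1, len(lst)):
--         if lst[i] == lst[i-1] + 1:
--             result.append(lst[i-1])
--         else:
--             result.append(lst[i-1])
--             break
--     return result
-- ===== SOURCE B (Python) =====
-- def first_sequence(lst):
--     n = len(lst)
--     end = max(n - 1, 0)
--     for i in range(1, n):
--         if lst[i] != lst[i - 1] + 1:
--             end = i
--             break
--     return lst[:end]
-- ===== Notes on version B (the rewrite author's own statement) =====
-- stated objective: simpler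
-- what changed: B computes the boundary index with a plain index scan and returns a single slice lst[:end], instead of appending each prior element to an accumulator list.
import Mathlib
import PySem

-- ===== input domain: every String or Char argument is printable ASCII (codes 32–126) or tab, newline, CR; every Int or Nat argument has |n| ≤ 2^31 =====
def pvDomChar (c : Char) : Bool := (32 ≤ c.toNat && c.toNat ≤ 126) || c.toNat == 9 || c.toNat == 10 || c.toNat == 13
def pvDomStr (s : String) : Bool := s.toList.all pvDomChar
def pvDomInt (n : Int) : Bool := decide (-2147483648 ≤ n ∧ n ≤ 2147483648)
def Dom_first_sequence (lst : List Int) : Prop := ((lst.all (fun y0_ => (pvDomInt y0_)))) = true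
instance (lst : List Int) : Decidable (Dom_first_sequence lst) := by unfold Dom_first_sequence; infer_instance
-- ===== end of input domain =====

-- B replaces A's accumulator-append loop by a boundary-index scan followed by one slice (objective: simpler).

-- ===== PORT A =====
-- loop over range(1, len(lst)) with an accumulator `result`; an early break returns the
-- accumulator directly (indices from the range are always in bounds, so getD's default is never used)
def first_sequence_goA (lst : List Int) (result : List Int) : List Int → List Int
  | [] => result
  | i :: rest =>
    let prev := PySem.List.pyGetD lst (i - 1) 0
    if PySem.List.pyGetD lst i 0 = prev + 1 then
      first_sequence_goA lst (result ++ [prev]) rest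
    else
      result ++ [prev]

def first_sequence (lst : List Int) : List Int :=
  first_sequence_goA lst [] (PySem.List.pyRange 1 (lst.length : Int) 1)

-- ===== PORT B =====
-- scan for the first index i with lst[i] ≠ lst[i-1]+1 (default max(len-1, 0)), then one slice lst[:end]
def first_sequence_goB (lst : List Int) (dflt : Int) : List Int → Int
  | [] => dflt
  | i :: rest =>
    if PySem.List.pyGetD lst i 0 ≠ PySem.List.pyGetD lst (i - 1) 0 + 1 then i
    else first_sequence_goB lst dflt rest

def first_sequence_alt (lst : List Int) : List Int :=
  let n : Int := (lst.length : Int)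
  let e := first_sequence_goB lst (max (n - 1) 0) (PySem.List.pyRange 1 n 1)
  PySem.List.slice lst none (some e)

-- ===== PRECONDITION & SPEC =====
def Spec_first_sequence (lst : List Int) (out : List Int) : Prop := out = first_sequence_alt lst
instance (lst : List Int) (out : List Int) : Decidable (Spec_first_sequence lst out) := by unfold Spec_first_sequence; infer_instance

-- ===== CLAIM (what is proved, stated in full; the proofs are below) =====
def Claim_equal_first_sequence : Prop := ∀ (lst : List Int), Dom_first_sequence lst → Spec_first_sequence lst (first_sequence lst)

-- ===== LEMMAS AND PROOFS =====

-- A's accumulator step and B's boundary both extend/cut at take i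
theorem take_i_eq (lst : List Int) (i : Nat) (h1 : 1 ≤ i) (h2 : i ≤ lst.length) :
    lst.take (i - 1) ++ [PySem.List.pyGetD lst ((i : Int) - 1) 0] = lst.take i := by
  have hc : ((i : Int) - 1) = ((i - 1 : Nat) : Int) := by omega
  rw [hc, PySem.List.pyGetD_natCast]
  have hlt : i - 1 < lst.length := by omega
  have : i = (i - 1) + 1 := by omega
  rw [this, List.take_add_one]
  simp [List.getD, List.getElem?_eq_getElem hlt]

-- main loop invariant: starting both loops at index i (1 ≤ i ≤ n) with A's accumulator
-- equal to take (i-1), A's loop result is the take at the boundary index B's scan finds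
theorem first_sequence_loops (lst : List Int) :
    ∀ (k i : Nat), lst.length - i = k → 1 ≤ i → i ≤ lst.length →
      first_sequence_goA lst (lst.take (i - 1)) (PySem.List.pyRange (i : Int) (lst.length : Int) 1)
        = lst.take (first_sequence_goB lst ((lst.length : Int) - 1) (PySem.List.pyRange (i : Int) (lst.length : Int) 1)).toNat := by
  intro k
  induction k with
  | zero =>
    intro i hk h1 h2
    have hi : i = lst.length := by omega
    rw [PySem.List.pyRange_one_eq_nil (by omega)]
    simp only [first_sequence_goA, first_sequence_goB]
    congr 1
    omega
  | succ k ih =>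
    intro i hk h1 h2
    have hlt : (i : Int) < (lst.length : Int) := by omega
    rw [PySem.List.pyRange_one_cons hlt]
    simp only [first_sequence_goA, first_sequence_goB]
    by_cases hc : PySem.List.pyGetD lst (i : Int) 0 = PySem.List.pyGetD lst ((i : Int) - 1) 0 + 1
    · rw [if_pos hc, if_neg (by simpa using hc)]
      rw [take_i_eq lst i h1 h2]
      have hcast : (i : Int) + 1 = ((i + 1 : Nat) : Int) := by omega
      have := ih (i + 1) (by omega) (by omega) (by omega)
      rw [hcast]
      simpa using this
    · rw [if_neg hc, if_pos (by simpa using hc)]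
      rw [take_i_eq lst i h1 h2]
      simp

-- B's scan returns a nonnegative index when the default and all candidates are nonnegative
theorem goB_nonneg (lst : List Int) (dflt : Int) (hd : 0 ≤ dflt) :
    ∀ idxs : List Int, (∀ x ∈ idxs, 0 ≤ x) → 0 ≤ first_sequence_goB lst dflt idxs := by
  intro idxs
  induction idxs with
  | nil => intro _; exact hd
  | cons i rest ih =>
    intro hmem
    simp only [first_sequence_goB]
    split
    · exact hmem i (by simp)
    · exact ih (fun x hx => hmem x (by simp [hx]))

-- ===== VERDICT (by name: the statement is the Claim_ definition above) =====
theorem first_sequence_spec : Claim_equal_first_sequence := by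
  intro lst _
  show first_sequence lst = first_sequence_alt lst
  rcases lst with _ | ⟨a, tl⟩
  · rfl
  · have hlen : 1 ≤ (a :: tl).length := by simp
    simp only [first_sequence, first_sequence_alt]
    have hmax : max (((a :: tl).length : Int) - 1) 0 = ((a :: tl).length : Int) - 1 := by
      omega
    rw [hmax]
    have hnn : 0 ≤ first_sequence_goB (a :: tl) (((a :: tl).length : Int) - 1)
        (PySem.List.pyRange 1 ((a :: tl).length : Int) 1) := by
      apply goB_nonneg _ _ (by omega)
      intro x hx
      have := (PySem.List.mem_pyRange_one.mp hx).1
      omega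
    rw [PySem.List.slice_to _ hnn]
    have := first_sequence_loops (a :: tl) ((a :: tl).length - 1) 1 (by omega) le_rfl hlen
    simpa using this
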